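-- pv_equiv track=rewrite | github.com/Tony-xy-Liu/SABer | src/saber/clusterer.py | match_contigs
-- ===== SOURCE A (Python) =====
-- def match_contigs(p):
--     s1, s2, s1_col, s2_col = p
--     s1_set = set([i for i, e in enumerate(s1_col) if e == 1])
--     s2_set = set([i for i, e in enumerate(s2_col) if e == 1])
--     s1_s2 = len(s1_set.intersection(s2_set))
--     if s1_s2 > 3:
--         match_count = 1
--     else:
--         match_count = 0
--     return s1, s2, match_count
-- ===== SOURCE B (Python) =====
-- def match_contigs(p):
--     s1, s2, s1_col, s2_col = p
--     count = 0
--     for a, b in zip(s1_col, s2_col):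
--         if a == 1 and b == 1:
--             count += 1
--     return s1, s2, 1 if count > 3 else 0
-- ===== Notes on version B (the rewrite author's own statement) =====
-- stated objective: simpler
-- what changed: Replaces the two index-set comprehensions and set intersection by a single pass over zip(s1_col, s2_col) keeping a scalar counter of positions where both columns are 1.
import Mathlib
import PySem

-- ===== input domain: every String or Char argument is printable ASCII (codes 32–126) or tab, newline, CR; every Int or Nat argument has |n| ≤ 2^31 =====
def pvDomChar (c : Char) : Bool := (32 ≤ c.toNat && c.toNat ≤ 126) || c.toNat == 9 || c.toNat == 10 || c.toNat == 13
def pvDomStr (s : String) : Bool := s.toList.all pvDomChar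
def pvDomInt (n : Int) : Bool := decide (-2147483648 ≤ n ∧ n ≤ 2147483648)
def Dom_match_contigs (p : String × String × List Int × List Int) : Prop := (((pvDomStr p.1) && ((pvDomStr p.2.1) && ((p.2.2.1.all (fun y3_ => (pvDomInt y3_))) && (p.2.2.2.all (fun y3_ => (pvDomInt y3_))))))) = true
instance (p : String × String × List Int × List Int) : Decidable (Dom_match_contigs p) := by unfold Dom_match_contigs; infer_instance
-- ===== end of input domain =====

-- B replaces the two index sets and their intersection by one counting pass over zip; objective: simpler.

-- ===== PORT A =====
def match_contigs (p : String × String × List Int × List Int) : String × String × Int :=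
  let s1 := p.1
  let s2 := p.2.1
  let s1_col := p.2.2.1
  let s2_col := p.2.2.2
  let s1_set : PySem.Set Int :=
    PySem.Set.ofList ((PySem.List.enumerate s1_col).filterMap
      (fun ie => if ie.2 = 1 then some ie.1 else none))
  let s2_set : PySem.Set Int :=
    PySem.Set.ofList ((PySem.List.enumerate s2_col).filterMap
      (fun ie => if ie.2 = 1 then some ie.1 else none))
  let s1_s2 : Int := PySem.Set.len (PySem.Set.inter s1_set s2_set)
  let match_count : Int := if s1_s2 > 3 then 1 else 0
  (s1, s2, match_count)

-- ===== PORT B =====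
def match_contigs_alt (p : String × String × List Int × List Int) : String × String × Int :=
  let s1 := p.1
  let s2 := p.2.1
  let count : Int :=
    (p.2.2.1.zip p.2.2.2).foldl (fun c ab => if ab.1 = 1 ∧ ab.2 = 1 then c + 1 else c) 0
  (s1, s2, if count > 3 then 1 else 0)

-- ===== PRECONDITION & SPEC =====
def Spec_match_contigs (p : String × String × List Int × List Int) (out : String × String × Int) : Prop := out = match_contigs_alt p
instance (p : String × String × List Int × List Int) (out : String × String × Int) : Decidable (Spec_match_contigs p out) := by unfold Spec_match_contigs; infer_instance

-- ===== CLAIM (what is proved, stated in full; the proofs are below) =====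
def Claim_equal_match_contigs : Prop := ∀ (p : String × String × List Int × List Int), Dom_match_contigs p → Spec_match_contigs p (match_contigs p)

-- ===== LEMMAS AND PROOFS =====

/-- The index list `[i for i, e in enumerate(col, s) if e == 1]`. -/
def pvIdxs (col : List Int) (s : Int) : List Int :=
  (PySem.List.enumerate col s).filterMap (fun ie => if ie.2 = 1 then some ie.1 else none)

/-- The number of positions where both columns hold `1`. -/
def pvCnt : List Int → List Int → Nat
  | a :: as, b :: bs => (if a = 1 ∧ b = 1 then 1 else 0) + pvCnt as bs
  | _, _ => 0

theorem pvIdxs_nil (s : Int) : pvIdxs [] s = [] := rfl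

theorem pvIdxs_cons (a : Int) (as : List Int) (s : Int) :
    pvIdxs (a :: as) s = (if a = 1 then [s] else []) ++ pvIdxs as (s + 1) := by
  simp only [pvIdxs, PySem.List.enumerate_cons, List.filterMap_cons]
  by_cases h : a = 1 <;> simp [h]

theorem pvIdxs_ge (col : List Int) (s i : Int) (h : i ∈ pvIdxs col s) : s ≤ i := by
  induction col generalizing s with
  | nil => simp [pvIdxs_nil] at h
  | cons a as ih =>
    rw [pvIdxs_cons] at h
    rcases List.mem_append.1 h with h1 | h2
    · split at h1 <;> simp_all
    · have := ih (s + 1) h2; omega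

theorem pvIdxs_nodup (col : List Int) (s : Int) : (pvIdxs col s).Nodup := by
  induction col generalizing s with
  | nil => simp [pvIdxs_nil]
  | cons a as ih =>
    rw [pvIdxs_cons]
    refine List.Nodup.append ?_ (ih (s + 1)) ?_
    · split <;> simp
    · intro x hx hx'
      have h2 := pvIdxs_ge as (s + 1) x hx'
      split at hx
      · simp at hx; omega
      · simp at hx

theorem pvInter_length (as bs : List Int) (s : Int) :
    ((pvIdxs as s).filter (fun i => (pvIdxs bs s).contains i)).length = pvCnt as bs := by
  induction as generalizing bs s with
  | nil => simp [pvIdxs_nil, pvCnt]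
  | cons a as ih =>
    cases bs with
    | nil => simp [pvIdxs_nil, pvCnt]
    | cons b bs =>
      rw [pvIdxs_cons, pvIdxs_cons, List.filter_append]
      have hmem : ∀ x ∈ pvIdxs as (s + 1),
          ((if b = 1 then [s] else []) ++ pvIdxs bs (s + 1)).contains x
            = (pvIdxs bs (s + 1)).contains x := by
        intro x hx
        have hxs := pvIdxs_ge as (s + 1) x hx
        split <;> simp_all
        omega
      rw [List.filter_congr hmem]
      have hs : s ∉ pvIdxs bs (s + 1) := fun h => by have := pvIdxs_ge bs (s + 1) s h; omega
      have hfirst : ((if a = 1 then [s] else []).filter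
          (fun i => ((if b = 1 then [s] else []) ++ pvIdxs bs (s + 1)).contains i)).length
            = (if a = 1 ∧ b = 1 then 1 else 0) := by
        split_ifs with h1 h2 h3 <;> simp_all
      simp only [List.length_append, hfirst, ih bs (s + 1), pvCnt]

theorem pvFoldl_cnt (as bs : List Int) (c : Int) :
    (as.zip bs).foldl (fun c ab => if ab.1 = 1 ∧ ab.2 = 1 then c + 1 else c) c
      = c + pvCnt as bs := by
  induction as generalizing bs c with
  | nil => simp [pvCnt]
  | cons a as ih =>
    cases bs with
    | nil => simp [pvCnt]
    | cons b bs =>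
      simp only [List.zip_cons_cons, List.foldl_cons, ih, pvCnt]
      split <;> push_cast <;> ring

theorem pvSetLen (as bs : List Int) :
    PySem.Set.len (PySem.Set.inter (PySem.Set.ofList (pvIdxs as 0)) (PySem.Set.ofList (pvIdxs bs 0)))
      = (pvCnt as bs : Int) := by
  have e1 : PySem.Set.ofList (pvIdxs as 0) = pvIdxs as 0 :=
    PySem.Set.ofList_eq_self_of_nodup _ (pvIdxs_nodup as 0)
  have e2 : PySem.Set.ofList (pvIdxs bs 0) = pvIdxs bs 0 :=
    PySem.Set.ofList_eq_self_of_nodup _ (pvIdxs_nodup bs 0)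
  rw [e1, e2]
  simp only [PySem.Set.inter, PySem.Set.len, PySem.Set.contains_eq_listContains]
  exact_mod_cast pvInter_length as bs 0

-- ===== VERDICT (by name: the statement is the Claim_ definition above) =====
theorem match_contigs_spec : Claim_equal_match_contigs := by
  intro p _
  show match_contigs p = match_contigs_alt p
  obtain ⟨s1, s2, as, bs⟩ := p
  show (s1, s2,
      if PySem.Set.len (PySem.Set.inter (PySem.Set.ofList (pvIdxs as 0))
          (PySem.Set.ofList (pvIdxs bs 0))) > 3 then (1 : Int) else 0)
    = (s1, s2,
      if (as.zip bs).foldl (fun c ab => if ab.1 = 1 ∧ ab.2 = 1 then c + 1 else c) 0 > 3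
        then (1 : Int) else 0)
  rw [pvSetLen, pvFoldl_cnt]
  norm_num
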